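-- pv_equiv track=rewrite | github.com/coolman-success/CodeSignalPractice | Arcade/Intro/12 - Land of Logic/57 - File Naming.py | solution
-- ===== SOURCE A (Python) =====
-- def solution(names):
--
--     for i in range(len(names)):
--         if names[i] in names[:i]:
--             cnt = 1
--             while names[i] + f'({cnt})' in names[:i]:
--                 cnt += 1
--             names[i] += f'({cnt})'
--
--     return names
-- ===== SOURCE B (Python) =====
-- def _suffix(name, w):
--     """the canonical '(k)' suffix string k of w for base `name`, else None"""
--     if w.startswith(name + '(') and w.endswith(')'):
--         mid = w[len(name) + 1:-1]
--         if mid.isdigit() and not mid.startswith('0'):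
--             return mid
--     return None
--
-- def solution(names):
--     out = []
--     for name in names:
--         if name in out:
--             # collect the counter strings already attached to this base in the output
--             taken = set()
--             for w in out:
--                 m = _suffix(name, w)
--                 if m is not None:
--                     taken.add(m)
--             # smallest positive counter whose decimal form is not taken (closed-form mex)
--             k = min(k for k in range(1, len(taken) + 2) if str(k) not in taken)
--             out.append(name + '(' + str(k) + ')')
--         else:
--             out.append(name)
--     return out
-- ===== Notes on version B (the rewrite author's own statement) =====
-- stated objective: faster
-- what changed: Instead of probing successive candidate names 'base(1)','base(2)',... against the (re-sliced) prefix, B parses the canonical '(k)' suffixes already present in the output for this base into a set in one scan and picks the smallest absent positive counter as a closed-form min over a bounded range.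
import Mathlib
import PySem

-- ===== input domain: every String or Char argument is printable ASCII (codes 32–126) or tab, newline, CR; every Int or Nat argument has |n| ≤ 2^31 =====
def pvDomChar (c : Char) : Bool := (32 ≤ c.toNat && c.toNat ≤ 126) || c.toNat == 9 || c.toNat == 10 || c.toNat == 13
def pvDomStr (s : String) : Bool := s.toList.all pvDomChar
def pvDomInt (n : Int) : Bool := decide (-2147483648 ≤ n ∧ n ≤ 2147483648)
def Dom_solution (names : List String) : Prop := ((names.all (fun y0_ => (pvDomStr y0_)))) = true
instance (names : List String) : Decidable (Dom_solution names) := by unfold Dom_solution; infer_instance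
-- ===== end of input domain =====

-- B replaces A's candidate probing ('base(1)', 'base(2)', … tested against the prefix) by one
-- parse of the '(k)' suffixes already attached to the base and a closed-form minimum over a
-- bounded range; equivalence is about the RETURN value only (Python A also renames the
-- elements of `names` in place, B leaves its argument untouched).

-- ===== PORT A =====
-- the `while names[i] + f'({cnt})' in names[:i]: cnt += 1` loop; fuel |prefix|+1 suffices
-- (proved below: among |prefix|+1 distinct candidate names one is free), so the port is exact.
def solWhileA (pre : List String) (name : String) : Nat → Int → Int
  | 0, cnt => cnt
  | fuel + 1, cnt =>
    if name ++ "(" ++ PySem.Int.toStr cnt ++ ")" ∈ pre then solWhileA pre name fuel (cnt + 1)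
    else cnt

-- the for-loop: since A renames names[i] in place, names[:i] is exactly the already-processed
-- prefix, carried here as the accumulator `done`.
def solGoA (done : List String) : List String → List String
  | [] => done
  | n :: rest =>
    if n ∈ done then
      let cnt := solWhileA done n (done.length + 1) 1
      solGoA (done ++ [n ++ "(" ++ PySem.Int.toStr cnt ++ ")"]) rest
    else
      solGoA (done ++ [n]) rest

def solution (names : List String) : List String := solGoA [] names

-- ===== PORT B =====
-- Source B's helper _suffix(name, w): the canonical '(k)' suffix string of w for base name, else None
def parseB (name w : String) : Option String :=
  if PySem.Str.startswith w (name ++ "(") && PySem.Str.endswith w ")" then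
    if PySem.Str.strIsdigit (PySem.Str.slice w (some (PySem.Str.len name + 1)) (some (-1)))
        && !(PySem.Str.startswith (PySem.Str.slice w (some (PySem.Str.len name + 1)) (some (-1))) "0") then
      some (PySem.Str.slice w (some (PySem.Str.len name + 1)) (some (-1)))
    else none
  else none

-- Source B's inner `for w in out:` body (add the parsed suffix, if any, to `taken`)
def solAddB (name : String) (s : PySem.Set String) (w : String) : PySem.Set String :=
  match parseB name w with
  | some m => PySem.Set.add s m
  | none => s

-- Source B's `min(k for k in range(1, len(taken) + 2) if str(k) not in taken)`; the filtered range
-- is proved nonempty below (pigeonhole), so the getD default is never used and Python's min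
-- never raises.
def solPickB (taken : PySem.Set String) : Int :=
  (PySem.List.min?
    ((PySem.List.pyRange 1 ((taken.length : Int) + 2) 1).filter
      (fun k => !(PySem.Set.contains taken (PySem.Int.toStr k))))
    (fun x => x)).getD 1

-- Source B's outer loop, accumulator `out`
def solGoB (out : List String) : List String → List String
  | [] => out
  | name :: rest =>
    if name ∈ out then
      let taken := out.foldl (solAddB name) PySem.Set.empty
      let k := solPickB taken
      solGoB (out ++ [name ++ "(" ++ PySem.Int.toStr k ++ ")"]) rest
    else
      solGoB (out ++ [name]) rest

def solution_alt (names : List String) : List String := solGoB [] names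

-- ===== PRECONDITION & SPEC =====
def Spec_solution (names : List String) (out : List String) : Prop := out = solution_alt names
instance (names : List String) (out : List String) : Decidable (Spec_solution names out) := by unfold Spec_solution; infer_instance

-- ===== CLAIM (what is proved, stated in full; the proofs are below) =====
def Claim_equal_solution : Prop := ∀ (names : List String), Dom_solution names → Spec_solution names (solution names)

-- ===== LEMMAS AND PROOFS =====

-- fuel-free decimal digits, to reason about Nat.toDigits (which PySem.Int.toStr uses)
def dig (n : Nat) : List Char :=
  if h : n / 10 = 0 then [Nat.digitChar (n % 10)]
  else dig (n / 10) ++ [Nat.digitChar (n % 10)]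
decreasing_by omega

lemma digitChar_inj (a b : Nat) (ha : a < 10) (hb : b < 10)
    (h : Nat.digitChar a = Nat.digitChar b) : a = b := by
  interval_cases a <;> interval_cases b <;> revert h <;> decide

lemma dig_ne_nil (n : Nat) : dig n ≠ [] := by
  rw [dig]; split <;> simp

lemma core_eq_dig : ∀ (f n : Nat) (ds : List Char), n < f →
    Nat.toDigitsCore 10 f n ds = dig n ++ ds := by
  intro f
  induction f with
  | zero => intro n ds h; omega
  | succ f ih =>
    intro n ds h
    rw [Nat.toDigitsCore]
    by_cases h10 : n / 10 = 0
    · simp only [h10, if_pos]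
      rw [dig, dif_pos h10]
      rfl
    · simp only [h10, if_neg, not_false_iff]
      rw [ih (n / 10) _ (by omega)]
      conv_rhs => rw [dig]
      rw [dif_neg h10, List.append_assoc, List.singleton_append]

lemma toDigits_eq_dig (n : Nat) : Nat.toDigits 10 n = dig n := by
  have h := core_eq_dig (n + 1) n [] (by omega)
  simpa [Nat.toDigits] using h

lemma dig_inj : ∀ a b : Nat, dig a = dig b → a = b := by
  intro a
  induction a using Nat.strong_induction_on with
  | _ a ih =>
    intro b h
    by_cases ha : a / 10 = 0 <;> by_cases hb : b / 10 = 0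
    · rw [dig.eq_def b, dif_pos hb, dig.eq_def a, dif_pos ha] at h
      simp only [List.cons.injEq, and_true] at h
      have := digitChar_inj (a % 10) (b % 10) (by omega) (by omega) h
      omega
    · rw [dig.eq_def b, dif_neg hb, dig.eq_def a, dif_pos ha] at h
      have hl := congrArg List.length h
      simp only [List.length_append, List.length_cons, List.length_nil] at hl
      have hlen : 0 < (dig (b / 10)).length := List.length_pos_iff.mpr (dig_ne_nil _)
      omega
    · rw [dig.eq_def b, dif_pos hb, dig.eq_def a, dif_neg ha] at h
      have hl := congrArg List.length h
      simp only [List.length_append, List.length_cons, List.length_nil] at hl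
      have hlen : 0 < (dig (a / 10)).length := List.length_pos_iff.mpr (dig_ne_nil _)
      omega
    · rw [dig.eq_def b, dif_neg hb, dig.eq_def a, dif_neg ha] at h
      obtain ⟨h1, h2⟩ := List.append_inj' h (by simp)
      have hdiv := ih (a / 10) (by omega) (b / 10) h1
      simp only [List.cons.injEq, and_true] at h2
      have := digitChar_inj (a % 10) (b % 10) (by omega) (by omega) h2
      omega

lemma toChars_pos (k : Int) (hk : 1 ≤ k) : PySem.Int.toChars k = dig k.toNat := by
  unfold PySem.Int.toChars
  rw [if_neg (by omega), toDigits_eq_dig]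

lemma toStr_inj (a b : Int) (ha : 1 ≤ a) (hb : 1 ≤ b)
    (h : PySem.Int.toStr a = PySem.Int.toStr b) : a = b := by
  have h' := congrArg String.toList h
  rw [PySem.Int.toList_toStr, PySem.Int.toList_toStr, toChars_pos a ha, toChars_pos b hb] at h'
  have := dig_inj _ _ h'
  omega

lemma cand_inj (n : String) (a b : Int) (ha : 1 ≤ a) (hb : 1 ≤ b)
    (h : n ++ "(" ++ PySem.Int.toStr a ++ ")" = n ++ "(" ++ PySem.Int.toStr b ++ ")") : a = b := by
  have h' := congrArg String.toList h
  simp only [String.toList_append] at h'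
  have h2 := List.append_cancel_left (List.append_cancel_right h')
  refine toStr_inj a b ha hb ?_
  have := congrArg String.ofList h2
  rwa [String.ofList_toList, String.ofList_toList] at this

-- pigeonhole: among |P|+1 distinct candidate names, at least one is not in P
lemma exists_free (P : List String) (n : String) (start : Int) (hs : 1 ≤ start) :
    ∃ k : Nat, k < P.length + 1 ∧ n ++ "(" ++ PySem.Int.toStr (start + k) ++ ")" ∉ P := by
  by_contra hc
  push Not at hc
  have hnd : ((List.range (P.length + 1)).map
      (fun k : Nat => n ++ "(" ++ PySem.Int.toStr (start + k) ++ ")")).Nodup := by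
    refine (List.nodup_map_iff_inj_on List.nodup_range).mpr ?_
    intro x hx y hy hxy
    have := cand_inj n (start + x) (start + y) (by omega) (by omega) hxy
    omega
  have hsub : ((List.range (P.length + 1)).map
      (fun k : Nat => n ++ "(" ++ PySem.Int.toStr (start + k) ++ ")")) ⊆ P := by
    intro s hsmem
    simp only [List.mem_map, List.mem_range] at hsmem
    obtain ⟨k, hk, rfl⟩ := hsmem
    exact hc k hk
  have := (List.subperm_of_subset hnd hsub).length_le
  simp at this

-- the while loop computes the least free counter ≥ start, provided some free one is within fuel
lemma whileA_spec : ∀ (fuel : Nat) (P : List String) (n : String) (start : Int),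
    (∃ k : Nat, k < fuel ∧ n ++ "(" ++ PySem.Int.toStr (start + k) ++ ")" ∉ P) →
    (n ++ "(" ++ PySem.Int.toStr (solWhileA P n fuel start) ++ ")") ∉ P ∧
    start ≤ solWhileA P n fuel start ∧
    ∀ j : Int, start ≤ j → j < solWhileA P n fuel start →
      (n ++ "(" ++ PySem.Int.toStr j ++ ")") ∈ P := by
  intro fuel
  induction fuel with
  | zero => intro P n start h; obtain ⟨k, hk, _⟩ := h; omega
  | succ fuel ih =>
    intro P n start h
    rw [solWhileA]
    by_cases hmem : n ++ "(" ++ PySem.Int.toStr start ++ ")" ∈ P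
    · rw [if_pos hmem]
      obtain ⟨k, hk, hfree⟩ := h
      have hk0 : k ≠ 0 := by rintro rfl; simp at hfree; exact hfree hmem
      obtain ⟨hf, hle, hall⟩ := ih P n (start + 1)
        ⟨k - 1, by omega, by
          have : start + 1 + ((k - 1 : Nat) : Int) = start + (k : Int) := by omega
          rw [this]; exact hfree⟩
      refine ⟨hf, by omega, ?_⟩
      intro j hj1 hj2
      rcases eq_or_lt_of_le hj1 with heq | hlt
      · rw [← heq]; exact hmem
      · exact hall j (by omega) hj2
    · rw [if_neg hmem]
      exact ⟨hmem, le_refl _, fun j h1 h2 => absurd (lt_of_le_of_lt h1 h2) (lt_irrefl _)⟩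

-- ---- B-side lemmas ----

lemma solAddB_some (name w m : String) (s : PySem.Set String) (h : parseB name w = some m) :
    solAddB name s w = PySem.Set.add s m := by
  unfold solAddB; rw [h]

lemma solAddB_none (name w : String) (s : PySem.Set String) (h : parseB name w = none) :
    solAddB name s w = s := by
  unfold solAddB; rw [h]

lemma mem_foldl_addB (name : String) : ∀ (out : List String) (s : PySem.Set String) (x : String),
    x ∈ out.foldl (solAddB name) s ↔ x ∈ s ∨ ∃ w ∈ out, parseB name w = some x := by
  intro out
  induction out with
  | nil => intro s x; simp
  | cons w rest ih =>
    intro s x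
    rw [List.foldl_cons]
    cases h : parseB name w with
    | none =>
      rw [solAddB_none name w s h, ih]
      constructor
      · rintro (hx | ⟨u, hu, hp⟩)
        · exact Or.inl hx
        · exact Or.inr ⟨u, List.mem_cons_of_mem _ hu, hp⟩
      · rintro (hx | ⟨u, hu, hp⟩)
        · exact Or.inl hx
        · rcases List.mem_cons.mp hu with rfl | hu'
          · rw [h] at hp; cases hp
          · exact Or.inr ⟨u, hu', hp⟩
    | some m =>
      rw [solAddB_some name w m s h, ih]
      constructor
      · rintro (hx | ⟨u, hu, hp⟩)
        · rcases (PySem.Set.mem_add s m x).mp hx with hx' | rfl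
          · exact Or.inl hx'
          · exact Or.inr ⟨w, List.mem_cons_self, h⟩
        · exact Or.inr ⟨u, List.mem_cons_of_mem _ hu, hp⟩
      · rintro (hx | ⟨u, hu, hp⟩)
        · exact Or.inl ((PySem.Set.mem_add s m x).mpr (Or.inl hx))
        · rcases List.mem_cons.mp hu with rfl | hu'
          · rw [h] at hp
            exact Or.inl ((PySem.Set.mem_add s m x).mpr (Or.inr (Option.some_inj.mp hp).symm))
          · exact Or.inr ⟨u, hu', hp⟩

lemma paren_toList : ("(" : String).toList = ['('] ∧ (")" : String).toList = [')'] ∧ ("0" : String).toList = ['0'] :=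
  ⟨rfl, rfl, rfl⟩

-- the slice w[p+1:-1] on a string of shape  name ++ '(' ++ m ++ ')'
lemma slice_mid (pre m : List Char) (c d : Char) :
    PySem.List.slice (pre ++ c :: (m ++ [d])) (some ((pre.length : Int) + 1)) (some (-1)) = m := by
  have hlen : (pre ++ c :: (m ++ [d])).length = pre.length + m.length + 2 := by
    simp [List.length_append]
    omega
  have hcast : ((pre.length : Int) + 1) = ((pre.length + 1 : Nat) : Int) := by push_cast; ring
  rw [hcast]
  have e1 : PySem.List.slice (pre ++ c :: (m ++ [d])) (some ((pre.length + 1 : Nat) : Int)) (some (-1))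
      = List.take (PySem.List.clampIdx (pre ++ c :: (m ++ [d])).length (-1)
          - PySem.List.clampIdx (pre ++ c :: (m ++ [d])).length ((pre.length + 1 : Nat) : Int))
        (List.drop (PySem.List.clampIdx (pre ++ c :: (m ++ [d])).length ((pre.length + 1 : Nat) : Int))
          (pre ++ c :: (m ++ [d]))) := rfl
  rw [e1, PySem.List.clampIdx_natCast, PySem.List.clampIdx_neg_one, hlen]
  have hmin : min (pre.length + 1) (pre.length + m.length + 2) = pre.length + 1 := by omega
  rw [hmin]
  have hsplit : pre ++ c :: (m ++ [d]) = (pre ++ [c]) ++ (m ++ [d]) := by simp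
  rw [hsplit, List.drop_left' (by simp)]
  have harith : pre.length + m.length + 2 - 1 - (pre.length + 1) = m.length := by omega
  rw [harith, List.take_left' rfl]

lemma dig_isdigit (n : Nat) : ∀ c ∈ dig n, PySem.Chars.isdigit c = true := by
  induction n using Nat.strong_induction_on with
  | _ n ih =>
    intro c hc
    rw [dig] at hc
    have h10 : n % 10 < 10 := by omega
    split at hc
    · simp only [List.mem_singleton] at hc
      subst hc
      unfold PySem.Chars.isdigit Nat.digitChar
      interval_cases h : (n % 10) <;> decide
    · rcases List.mem_append.mp hc with hc' | hc'
      · exact ih (n / 10) (by omega) c hc'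
      · simp only [List.mem_singleton] at hc'
        subst hc'
        unfold PySem.Chars.isdigit Nat.digitChar
        interval_cases h : (n % 10) <;> decide

lemma dig_head_ne_zero (n : Nat) (hn : 1 ≤ n) : (dig n).head? ≠ some '0' := by
  induction n using Nat.strong_induction_on with
  | _ n ih =>
    rw [dig]
    split
    · rename_i h10
      have hlt : n < 10 := by omega
      simp only [List.head?_cons, ne_eq, Option.some_inj]
      rw [Nat.mod_eq_of_lt hlt]
      interval_cases n <;> decide
    · rename_i h10
      rw [List.head?_append_of_ne_nil _ (dig_ne_nil _)]
      exact ih (n / 10) (by omega) (by omega)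

-- forward: the canonical candidate parses to its own counter string
lemma parseB_cand (name : String) (k : Int) (hk : 1 ≤ k) :
    parseB name (name ++ "(" ++ PySem.Int.toStr k ++ ")") = some (PySem.Int.toStr k) := by
  obtain ⟨hpo, hpc, hz⟩ := paren_toList
  have hw : (name ++ "(" ++ PySem.Int.toStr k ++ ")").toList
      = name.toList ++ '(' :: ((dig k.toNat) ++ [')']) := by
    rw [String.toList_append, String.toList_append, String.toList_append, hpo, hpc,
      PySem.Int.toList_toStr, toChars_pos k hk]
    simp
  have hmidl : (PySem.Str.slice (name ++ "(" ++ PySem.Int.toStr k ++ ")")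
      (some (PySem.Str.len name + 1)) (some (-1))).toList = dig k.toNat := by
    unfold PySem.Str.slice PySem.Str.len
    rw [String.toList_ofList, PySem.Chars.slice_eq_listSlice, hw]
    exact slice_mid name.toList (dig k.toNat) '(' ')'
  have hmid : PySem.Str.slice (name ++ "(" ++ PySem.Int.toStr k ++ ")")
      (some (PySem.Str.len name + 1)) (some (-1)) = PySem.Int.toStr k := by
    have h1 := congrArg String.ofList hmidl
    rw [String.ofList_toList] at h1
    have h2 : (PySem.Int.toStr k).toList = dig k.toNat := by
      rw [PySem.Int.toList_toStr, toChars_pos k hk]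
    rw [h1, ← h2, String.ofList_toList]
  unfold parseB
  rw [if_pos, hmid, if_pos]
  · rw [Bool.and_eq_true]
    constructor
    · unfold PySem.Str.strIsdigit PySem.Chars.strIsdigit
      rw [Bool.and_eq_true]
      refine ⟨?_, ?_⟩
      · rw [PySem.Int.toList_toStr, toChars_pos k hk]
        simp [dig_ne_nil]
      · rw [List.all_eq_true]
        intro c hc
        rw [PySem.Int.toList_toStr, toChars_pos k hk] at hc
        exact dig_isdigit k.toNat c hc
    · rw [Bool.not_eq_eq_eq_not, Bool.not_true]
      unfold PySem.Str.startswith PySem.Chars.startswith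
      rw [hz, ← Bool.not_eq_true, List.isPrefixOf_iff_prefix]
      intro hpre
      obtain ⟨t, ht⟩ := hpre
      have hhead := congrArg List.head? ht
      rw [PySem.Int.toList_toStr, toChars_pos k hk] at hhead
      exact dig_head_ne_zero k.toNat (by omega) (by rw [← hhead]; rfl)
  · rw [Bool.and_eq_true]
    constructor
    · unfold PySem.Str.startswith PySem.Chars.startswith
      rw [List.isPrefixOf_iff_prefix, String.toList_append, hpo, hw]
      exact ⟨dig k.toNat ++ [')'], by simp⟩
    · unfold PySem.Str.endswith
      rw [(PySem.Chars.endswith_iff _ _)]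
      rw [hpc, hw]
      exact ⟨name.toList ++ '(' :: dig k.toNat, by simp⟩

-- backward: anything that parses IS of that shape
lemma parseB_shape (name w m : String) (h : parseB name w = some m) :
    w = name ++ "(" ++ m ++ ")" := by
  obtain ⟨hpo, hpc, hz⟩ := paren_toList
  unfold parseB at h
  split at h
  · rename_i hcond
    rw [Bool.and_eq_true] at hcond
    obtain ⟨hsw, hew⟩ := hcond
    unfold PySem.Str.startswith PySem.Chars.startswith at hsw
    rw [List.isPrefixOf_iff_prefix, String.toList_append, hpo] at hsw
    obtain ⟨t, ht'⟩ := hsw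
    have ht : w.toList = name.toList ++ '(' :: t := by
      rw [← ht']
      simp
    have hend : [')'] <:+ w.toList := by
      unfold PySem.Str.endswith at hew
      rw [PySem.Chars.endswith_iff, hpc] at hew
      exact hew
    obtain ⟨u, hu⟩ := hend
    have htne : t ≠ [] := by
      rintro rfl
      have hlast := congrArg List.getLast? hu
      rw [ht] at hlast
      simp at hlast
    have ht2 : t = t.dropLast ++ [t.getLast htne] := (List.dropLast_append_getLast htne).symm
    have hg1 : w.toList.getLast? = some ')' := by
      rw [← hu]
      simp
    have hg2 : w.toList.getLast? = some (t.getLast htne) := by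
      rw [ht]
      conv_lhs => rw [ht2]
      rw [show ('(' :: (t.dropLast ++ [t.getLast htne])) = ('(' :: t.dropLast) ++ [t.getLast htne] by simp,
        ← List.append_assoc, List.getLast?_concat]
    have hc : t.getLast htne = ')' := by
      rw [hg1] at hg2
      exact (Option.some_inj.mp hg2).symm
    rw [hc] at ht2
    split at h
    · have hm : PySem.Str.slice w (some (PySem.Str.len name + 1)) (some (-1)) = m :=
        Option.some_inj.mp h
      have hmidl : m.toList = t.dropLast := by
        rw [← hm]
        unfold PySem.Str.slice PySem.Str.len
        rw [String.toList_ofList, PySem.Chars.slice_eq_listSlice, ht]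
        conv_lhs => rw [ht2]
        exact slice_mid name.toList t.dropLast '(' ')'
      have hfin : w.toList = (name ++ "(" ++ m ++ ")").toList := by
        rw [String.toList_append, String.toList_append, String.toList_append, hpo, hpc, hmidl,
          ht]
        conv_lhs => rw [ht2]
        simp
      have := congrArg String.ofList hfin
      rwa [String.ofList_toList, String.ofList_toList] at this
    · cases h
  · cases h

-- the picked counter is the least k ≥ 1 whose decimal form is not taken
lemma pickB_spec (taken : PySem.Set String) :
    1 ≤ solPickB taken ∧ PySem.Int.toStr (solPickB taken) ∉ taken ∧
    ∀ j : Int, 1 ≤ j → j < solPickB taken → PySem.Int.toStr j ∈ taken := by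
  have hbool : ∀ x : String, ((!PySem.Set.contains taken x) = true) ↔ x ∉ taken := by
    intro x
    rw [Bool.not_eq_true']
    constructor
    · intro h hm
      rw [(PySem.Set.contains_iff taken x).mpr hm] at h
      cases h
    · intro hm
      cases hx : PySem.Set.contains taken x
      · rfl
      · exact absurd ((PySem.Set.contains_iff taken x).mp hx) hm
  set L := (PySem.List.pyRange 1 ((taken.length : Int) + 2) 1).filter
      (fun k => !(PySem.Set.contains taken (PySem.Int.toStr k))) with hL
  have hLne : L ≠ [] := by
    intro hnil
    have hall : ∀ k : Int, 1 ≤ k → k < (taken.length : Int) + 2 → PySem.Int.toStr k ∈ taken := by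
      intro k hk1 hk2
      by_contra hkn
      have hkL : k ∈ L := by
        rw [hL, List.mem_filter]
        exact ⟨PySem.List.mem_pyRange_one.mpr ⟨hk1, hk2⟩, (hbool _).mpr hkn⟩
      rw [hnil] at hkL
      cases hkL
    have hnd2 : ((List.range (taken.length + 1)).map
        (fun j : Nat => PySem.Int.toStr (1 + j))).Nodup := by
      refine (List.nodup_map_iff_inj_on List.nodup_range).mpr ?_
      intro x hx y hy hxy
      have := toStr_inj (1 + x) (1 + y) (by omega) (by omega) hxy
      omega
    have hsub : ((List.range (taken.length + 1)).map
        (fun j : Nat => PySem.Int.toStr (1 + j))) ⊆ taken := by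
      intro s hs
      simp only [List.mem_map, List.mem_range] at hs
      obtain ⟨j, hj, rfl⟩ := hs
      exact hall (1 + j) (by omega) (by omega)
    have := (List.subperm_of_subset hnd2 hsub).length_le
    simp at this
  obtain ⟨m, hm⟩ : ∃ m, PySem.List.min? L (fun x => x) = some m := by
    cases h : PySem.List.min? L (fun x => x) with
    | none => exact absurd ((PySem.List.min?_eq_none_iff L _).mp h) hLne
    | some m => exact ⟨m, rfl⟩
  have hpick : solPickB taken = m := by
    unfold solPickB
    rw [← hL, hm]
    rfl
  have hmem := PySem.List.min?_mem hm
  rw [hL, List.mem_filter] at hmem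
  obtain ⟨hmr, hmp⟩ := hmem
  obtain ⟨hm1, hm2⟩ := PySem.List.mem_pyRange_one.mp hmr
  have hmin := PySem.List.min?_isMin hm
  rw [hpick]
  refine ⟨hm1, (hbool _).mp hmp, ?_⟩
  intro j hj1 hj2
  by_contra hjn
  have hjL : j ∈ L := by
    rw [hL, List.mem_filter]
    exact ⟨PySem.List.mem_pyRange_one.mpr ⟨hj1, by omega⟩, (hbool _).mpr hjn⟩
  have := hmin j hjL
  simp only [] at this
  omega

lemma mem_empty_iff (x : String) : x ∈ (PySem.Set.empty : PySem.Set String) ↔ False := by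
  simp [PySem.Set.empty]

lemma go_eq : ∀ (rest done : List String), solGoB done rest = solGoA done rest := by
  intro rest
  induction rest with
  | nil => intro done; rfl
  | cons name rest ih =>
    intro done
    rw [solGoA, solGoB]
    by_cases hn : name ∈ done
    · rw [if_pos hn, if_pos hn]
      set taken := done.foldl (solAddB name) PySem.Set.empty with htaken
      have hbridge : ∀ j : Int, 1 ≤ j →
          (PySem.Int.toStr j ∈ taken ↔ name ++ "(" ++ PySem.Int.toStr j ++ ")" ∈ done) := by
        intro j hj
        rw [htaken, mem_foldl_addB, mem_empty_iff, false_or]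
        constructor
        · rintro ⟨w, hw, hp⟩
          rw [parseB_shape name w _ hp] at hw
          exact hw
        · intro hw
          exact ⟨_, hw, parseB_cand name j hj⟩
      obtain ⟨hk1, hkfree, hkall⟩ := pickB_spec taken
      obtain ⟨hAfree, hA1, hAall⟩ :=
        whileA_spec (done.length + 1) done name 1 (exists_free done name 1 (by omega))
      set cA := solWhileA done name (done.length + 1) 1 with hcA
      set kB := solPickB taken with hkB
      have heq : cA = kB := by
        have h1 : ¬ cA < kB := fun hlt => hAfree ((hbridge cA hA1).mp (hkall cA hA1 hlt))
        have h2 : ¬ kB < cA := fun hlt => hkfree ((hbridge kB hk1).mpr (hAall kB hk1 hlt))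
        omega
      rw [heq]
      exact ih _
    · rw [if_neg hn, if_neg hn]
      exact ih _

-- ===== VERDICT (by name: the statement is the Claim_ definition above) =====
theorem solution_spec : Claim_equal_solution := by
  intro names _
  unfold Spec_solution solution solution_alt
  exact (go_eq names []).symm
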